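-- pv_equiv track=rewrite | github.com/rocketfart/p365 | codeforinterview/google/find longest word.py | find
-- ===== SOURCE A (Python) =====
-- import collections
--
-- def find(wordlist):
--     dict=collections.defaultdict(list)
--     for i in wordlist:
--         dict[len(i)].append(i)
--     key=max(dict.keys())
--
--     def dfs(idx,x):
--         if idx==0:
--             return True
--         for i in dict[idx]:
--             if i in x:
--                 return dfs(idx-1,i)
--         return False
--
--     while key:
--         for i in dict[key]:
--            if dfs(key-1,i):
--                return i
--         key-=1
--     return 0
-- ===== SOURCE B (Python) =====
-- def find(wordlist):
--     groups = {}
--     for w in wordlist: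
--         groups.setdefault(len(w), []).append(w)
--     key = max(groups)  # ValueError on empty input, same as A
--     ok = {}  # memo: word -> does its greedy first-match chain reach length 1?
--
--     def chain(w):
--         # iterative greedy walk, recording the visited path; memoized across calls
--         path, cur = [], w
--         while True:
--             if cur in ok:
--                 res = ok[cur]
--                 break
--             path.append(cur)
--             if len(cur) == 1:
--                 res = True
--                 break
--             s = next((v for v in groups.get(len(cur) - 1, []) if v in cur), None)
--             if s is None:
--                 res = False
--                 break
--             cur = s
--         for u in path:
--             ok[u] = res
--         return res
--
--     for L in range(key, 0, -1):
--         for w in groups.get(L, []):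
--             if chain(w):
--                 return w
--     return 0
-- ===== Notes on version B (the rewrite author's own statement) =====
-- stated objective: alternative
-- what changed: Replaces A's top-down recursive dfs re-run for every candidate word by a single bottom-up memoized pass that computes each word's greedy-chain result once, then scans lengths descending for the first memoized success.
-- outside the precondition, e.g. on find(['']): A returns 0, B returns 0; on find(['ab', 'cd']): A returns 0, B returns 0
import Mathlib
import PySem

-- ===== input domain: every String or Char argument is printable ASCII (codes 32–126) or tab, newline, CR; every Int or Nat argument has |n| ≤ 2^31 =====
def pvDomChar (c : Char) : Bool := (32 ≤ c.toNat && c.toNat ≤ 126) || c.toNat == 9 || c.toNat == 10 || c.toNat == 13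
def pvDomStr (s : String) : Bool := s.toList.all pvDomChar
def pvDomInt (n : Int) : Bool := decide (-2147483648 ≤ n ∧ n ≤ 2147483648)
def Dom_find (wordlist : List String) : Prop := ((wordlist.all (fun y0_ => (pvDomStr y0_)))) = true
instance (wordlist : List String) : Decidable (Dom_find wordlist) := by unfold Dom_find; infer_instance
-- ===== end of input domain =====

-- B replaces A's repeated top-down dfs chain checks by one bottom-up memo pass (each word's
-- greedy chain result computed once); objective: alternative.

-- ===== PORT A =====
-- dict[len(i)].append(i) grouping loop (shared: both Pythons build the same length groups)
def pvGroups (wordlist : List String) : PySem.Dict Int (List String) :=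
  wordlist.foldl (fun d i => d.modify (PySem.Str.len i) [] (fun l => l ++ [i])) PySem.Dict.empty

-- 'for i in dict[idx]: if i in x: return dfs(idx-1, i)' / 'return False'
def pvDfsLoop (rec : String → Bool) : List String → String → Bool
  | [], _ => false
  | i :: rest, x => if PySem.Str.isIn i x then rec i else pvDfsLoop rec rest x

-- dfs(idx, x); idx is the Python int idx (≥ 0 at every call site), carried as a Nat
def pvDfs (g : PySem.Dict Int (List String)) : Nat → String → Bool
  | 0, _ => true
  | n + 1, x => pvDfsLoop (pvDfs g n) (g.getD ((n : Int) + 1) []) x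

-- 'for i in dict[key]: if dfs(key-1, i): return i'
def pvOuterLoop (test : String → Bool) : List String → Option String
  | [] => none
  | i :: rest => if test i then some i else pvOuterLoop test rest

-- 'while key: … ; key -= 1' (key = k here; key ≥ 0 always)
def pvOuter (g : PySem.Dict Int (List String)) : Nat → Option String
  | 0 => none
  | k + 1 =>
    match pvOuterLoop (pvDfs g k) (g.getD ((k : Int) + 1) []) with
    | some i => some i
    | none => pvOuter g k

def find (wordlist : List String) : Option String :=
  let g := pvGroups wordlist
  match PySem.List.max? g.keys (fun y => y) with
  | none => none        -- Python raises ValueError (max of empty dict); excluded by Pre_find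
  | some key => pvOuter g key.toNat    -- Python's 'return 0' on failure is the none result

-- ===== PORT B =====
-- 'groups.setdefault(len(w), []).append(w)' builds the same groups dict as A's loop: shared pvGroups above.

-- the 'while True' walk of chain(w): cur, the recorded path, and the memo lookups; fuel only makes the
-- loop structurally terminating (each step shortens cur by one, so (len w).toNat fuel never runs out)
def pvChainGo (g : PySem.Dict Int (List String)) (ok : PySem.Dict String Bool) :
    Nat → String → List String → Bool × List String
  | 0, _, path => (false, path)   -- unreachable on the calls find_alt makes
  | fuel + 1, cur, path =>
    match ok.get? cur with
    | some b => (b, path)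
    | none =>
      if PySem.Str.len cur = 1 then (true, path ++ [cur])
      else
        match (g.getD (PySem.Str.len cur - 1) []).find? (fun v => PySem.Str.isIn v cur) with
        | some s => pvChainGo g ok fuel s (path ++ [cur])
        | none => (false, path ++ [cur])

-- chain(w): run the walk, then 'for u in path: ok[u] = res'
def pvChain (g : PySem.Dict Int (List String)) (ok : PySem.Dict String Bool) (w : String) :
    Bool × PySem.Dict String Bool :=
  let r := pvChainGo g ok (PySem.Str.len w).toNat w []
  (r.1, r.2.foldl (fun d u => d.insert u r.1) ok)

-- 'for w in groups.get(L, []): if chain(w): return w' (the memo ok is threaded through)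
def pvScanGroup (g : PySem.Dict Int (List String)) :
    List String → PySem.Dict String Bool → Option String × PySem.Dict String Bool
  | [], ok => (none, ok)
  | w :: rest, ok =>
    let r := pvChain g ok w
    if r.1 then (some w, r.2) else pvScanGroup g rest r.2

-- 'for L in range(key, 0, -1): …'
def pvScanB (g : PySem.Dict Int (List String)) : Nat → PySem.Dict String Bool → Option String
  | 0, _ => none
  | k + 1, ok =>
    match pvScanGroup g (g.getD ((k : Int) + 1) []) ok with
    | (some w, _) => some w
    | (none, ok') => pvScanB g k ok'

def find_alt (wordlist : List String) : Option String :=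
  let g := pvGroups wordlist
  match PySem.List.max? g.keys (fun y => y) with
  | none => none        -- max(groups) raises ValueError on empty input; excluded by Pre_find
  | some key => pvScanB g key.toNat PySem.Dict.empty

-- ===== PRECONDITION & SPEC =====
-- Pre_ excludes the empty list, on which both Pythons raise ValueError, and lists with no word of
-- length exactly 1, on which both Pythons take the failure path and return the int 0, not a string.
def Pre_find (wordlist : List String) : Prop := ∃ w ∈ wordlist, PySem.Str.len w = 1
instance (wordlist : List String) : Decidable (Pre_find wordlist) := by unfold Pre_find; infer_instance
def pvWitness_find : List String := ["ab", "a"]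
def Spec_find (wordlist : List String) (out : Option String) : Prop := out = find_alt wordlist
instance (wordlist : List String) (out : Option String) : Decidable (Spec_find wordlist out) := by unfold Spec_find; infer_instance

-- ===== CLAIM (what is proved, stated in full; the proofs are below) =====
def Claim_equal_find : Prop := ∀ (wordlist : List String), Dom_find wordlist → Pre_find wordlist → Spec_find wordlist (find wordlist)

-- ===== LEMMAS AND PROOFS =====

theorem pvGroups_getD_aux (wl : List String) (d : PySem.Dict Int (List String)) (c : Int) :
    (wl.foldl (fun d i => d.modify (PySem.Str.len i) [] (fun l => l ++ [i])) d).getD c []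
      = d.getD c [] ++ wl.filter (fun i => PySem.Str.len i == c) := by
  
  induction wl generalizing d with
  | nil => simp
  | cons i t ih =>
    simp only [List.foldl_cons, List.filter_cons]
    rw [ih]
    by_cases h : (i.length : Int) = c
    · simp [h]
    · simp [PySem.Dict.getD_modify, h, Ne.symm h]

theorem pvGroups_getD (wl : List String) (c : Int) :
    (pvGroups wl).getD c [] = wl.filter (fun i => PySem.Str.len i == c) := by
  
  simpa [pvGroups] using pvGroups_getD_aux wl PySem.Dict.empty c

theorem pvGroups_len (wl : List String) (c : Int) (w : String)
    (h : w ∈ (pvGroups wl).getD c []) : PySem.Str.len w = c := by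
  
  rw [pvGroups_getD] at h
  simpa using (List.of_mem_filter h)

theorem pvDfsLoop_eq_find? (rec : String → Bool) (l : List String) (x : String) :
    pvDfsLoop rec l x
      = match l.find? (fun i => PySem.Str.isIn i x) with
        | some i => rec i
        | none => false := by
  
  induction l with
  | nil => rfl
  | cons i rest ih =>
    by_cases h : PySem.Chars.isIn i.toList x.toList = true
    · simp [pvDfsLoop, List.find?, h]
    · simp only [pvDfsLoop, List.find?]
      simp [h]
      simpa using ih

-- a memo entry is exactly the dfs value of its word (words of length ≥ 1 only)
def GoodMemo (g : PySem.Dict Int (List String)) (ok : PySem.Dict String Bool) : Prop :=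
  ∀ (w : String) (b : Bool), ok.get? w = some b →
    1 ≤ PySem.Str.len w ∧ b = pvDfs g (PySem.Str.len w - 1).toNat w

theorem pvChainGo_spec (g : PySem.Dict Int (List String))
    (hg : ∀ (c : Int) (w : String), w ∈ g.getD c [] → PySem.Str.len w = c)
    (ok : PySem.Dict String Bool) (hok : GoodMemo g ok) :
    ∀ (fuel : Nat) (cur : String), 1 ≤ PySem.Str.len cur → (PySem.Str.len cur).toNat ≤ fuel →
      ∀ path : List String,
        (pvChainGo g ok fuel cur path).1 = pvDfs g (PySem.Str.len cur - 1).toNat cur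
        ∧ ∃ np, (pvChainGo g ok fuel cur path).2 = path ++ np
            ∧ ∀ u ∈ np, 1 ≤ PySem.Str.len u
                ∧ pvDfs g (PySem.Str.len u - 1).toNat u = (pvChainGo g ok fuel cur path).1 := by
  intro fuel
  induction fuel with
  | zero =>
    intro cur h1 h2 path
    exfalso
    omega
  | succ fuel ih =>
    intro cur h1 h2 path
    cases hmem : ok.get? cur with
    | some b =>
      obtain ⟨_, hb⟩ := hok cur b hmem
      simp only [pvChainGo, hmem]
      refine ⟨hb, [], by simp, ?_⟩
      intro u hu
      exact absurd hu (List.not_mem_nil)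
    | none =>
      by_cases hone : PySem.Str.len cur = 1
      · have h0 : (PySem.Str.len cur - 1).toNat = 0 := by omega
        simp only [pvChainGo, hmem, if_pos hone]
        refine ⟨by rw [h0]; rfl, [cur], rfl, ?_⟩
        intro u hu
        rcases List.mem_singleton.mp hu with rfl
        exact ⟨h1, by rw [h0]; rfl⟩
      · have hL2 : 2 ≤ PySem.Str.len cur := by omega
        have hn : (PySem.Str.len cur - 1).toNat = (PySem.Str.len cur - 2).toNat + 1 := by omega
        have hcast : (((PySem.Str.len cur - 2).toNat : Int)) + 1 = PySem.Str.len cur - 1 := by omega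
        have hdfs : pvDfs g (PySem.Str.len cur - 1).toNat cur
            = match (g.getD (PySem.Str.len cur - 1) []).find? (fun v => PySem.Str.isIn v cur) with
              | some s => pvDfs g (PySem.Str.len cur - 2).toNat s
              | none => false := by
          rw [hn]
          simp only [pvDfs, hcast, pvDfsLoop_eq_find?]
        simp only [pvChainGo, hmem, if_neg hone]
        cases hfind : (g.getD (PySem.Str.len cur - 1) []).find? (fun v => PySem.Str.isIn v cur) with
        | some s =>
          rw [hfind] at hdfs
          have hs : s ∈ g.getD (PySem.Str.len cur - 1) [] := List.mem_of_find?_eq_some hfind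
          have hlens : PySem.Str.len s = PySem.Str.len cur - 1 := hg _ _ hs
          have hns : (PySem.Str.len s - 1).toNat = (PySem.Str.len cur - 2).toNat := by omega
          obtain ⟨ihr, np, hnp, hnpall⟩ :=
            ih s (by omega) (by omega) (path ++ [cur])
          refine ⟨?_, [cur] ++ np, by rw [hnp, List.append_assoc], ?_⟩
          · rw [hdfs, ihr, hns]
          · intro u hu
            rcases List.mem_append.mp hu with hu | hu
            · rcases List.mem_singleton.mp hu with rfl
              exact ⟨h1, by rw [hdfs, ihr, hns]⟩
            · exact hnpall u hu
        | none =>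
          rw [hfind] at hdfs
          refine ⟨hdfs.symm, [cur], rfl, ?_⟩
          intro u hu
          rcases List.mem_singleton.mp hu with rfl
          exact ⟨h1, hdfs⟩

theorem pvGoodFold (g : PySem.Dict Int (List String)) (l : List String) (res : Bool) :
    ∀ ok : PySem.Dict String Bool, GoodMemo g ok →
    (∀ u ∈ l, 1 ≤ PySem.Str.len u ∧ pvDfs g (PySem.Str.len u - 1).toNat u = res) →
    GoodMemo g (l.foldl (fun d u => d.insert u res) ok) := by
  induction l with
  | nil => intro ok hok _; exact hok
  | cons u t ih =>
    intro ok hok hl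
    rw [List.foldl_cons]
    refine ih (ok.insert u res) ?_ (fun v hv => hl v (List.mem_cons_of_mem _ hv))
    intro w b hw
    by_cases hne : w = u
    · subst hne
      obtain ⟨h1, h2⟩ := hl w List.mem_cons_self
      have hb : b = res := by
        simp [PySem.Dict.get?_insert_self] at hw
        exact hw.symm
      exact ⟨h1, by rw [hb]; exact h2.symm⟩
    · rw [PySem.Dict.get?_insert_of_ne _ _ hne] at hw
      exact hok w b hw

theorem pvChain_spec (g : PySem.Dict Int (List String))
    (hg : ∀ (c : Int) (w : String), w ∈ g.getD c [] → PySem.Str.len w = c)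
    (ok : PySem.Dict String Bool) (hok : GoodMemo g ok) (w : String)
    (h1 : 1 ≤ PySem.Str.len w) :
    (pvChain g ok w).1 = pvDfs g (PySem.Str.len w - 1).toNat w
    ∧ GoodMemo g (pvChain g ok w).2 := by
  obtain ⟨hres, np, hnp, hnpall⟩ :=
    pvChainGo_spec g hg ok hok (PySem.Str.len w).toNat w h1 (le_refl _) []
  constructor
  · exact hres
  · show GoodMemo g ((pvChainGo g ok (PySem.Str.len w).toNat w []).2.foldl _ ok)
    rw [hnp]
    simp only [List.nil_append]
    exact pvGoodFold g np _ ok hok (fun u hu => ⟨(hnpall u hu).1, (hnpall u hu).2⟩)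

theorem pvScanGroup_spec (g : PySem.Dict Int (List String))
    (hg : ∀ (c : Int) (w : String), w ∈ g.getD c [] → PySem.Str.len w = c) (k : Nat) :
    ∀ (lst : List String), (∀ w ∈ lst, PySem.Str.len w = (k : Int) + 1) →
    ∀ ok : PySem.Dict String Bool, GoodMemo g ok →
      (pvScanGroup g lst ok).1 = pvOuterLoop (pvDfs g k) lst
      ∧ GoodMemo g (pvScanGroup g lst ok).2 := by
  intro lst
  induction lst with
  | nil => intro _ ok hok; exact ⟨rfl, hok⟩
  | cons w rest ih =>
    intro hlen ok hok
    have hw : PySem.Str.len w = (k : Int) + 1 := hlen w List.mem_cons_self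
    obtain ⟨hc1, hc2⟩ := pvChain_spec g hg ok hok w (by omega)
    have hk : (PySem.Str.len w - 1).toNat = k := by omega
    rw [hk] at hc1
    simp only [pvScanGroup, pvOuterLoop]
    rw [← hc1]
    cases hr : (pvChain g ok w).1 with
    | true => exact ⟨rfl, hc2⟩
    | false =>
      simp only [Bool.false_eq_true, if_false]
      exact ih (fun v hv => hlen v (List.mem_cons_of_mem _ hv)) _ hc2

theorem pvScanB_eq (g : PySem.Dict Int (List String))
    (hg : ∀ (c : Int) (w : String), w ∈ g.getD c [] → PySem.Str.len w = c) :
    ∀ (k : Nat) (ok : PySem.Dict String Bool), GoodMemo g ok → pvScanB g k ok = pvOuter g k := by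
  intro k
  induction k with
  | zero => intro ok _; rfl
  | succ k ih =>
    intro ok hok
    obtain ⟨h1, h2⟩ := pvScanGroup_spec g hg k (g.getD ((k : Int) + 1) [])
      (fun w hw => hg _ _ hw) ok hok
    simp only [pvScanB, pvOuter]
    rw [← h1]
    cases hp : pvScanGroup g (g.getD ((k : Int) + 1) []) ok with
    | mk o ok' =>
      rw [hp] at h2
      cases o with
      | some w => rfl
      | none => exact ih ok' h2
-- ===== VERDICT (by name: the statement is the Claim_ definition above) =====
theorem find_spec : Claim_equal_find := by
  intro wl _ hpre
  obtain ⟨w1, hw1, _⟩ := hpre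
  have hpre' : wl ≠ [] := List.ne_nil_of_mem hw1
  unfold Spec_find find find_alt
  have hg : ∀ (c : Int) (w : String), w ∈ (pvGroups wl).getD c [] → PySem.Str.len w = c :=
    fun c w h => pvGroups_len wl c w h
  have hkeys : (pvGroups wl).keys
      = PySem.Set.update (PySem.Dict.empty : PySem.Dict Int (List String)).keys
          (wl.map PySem.Str.len) :=
    PySem.Dict.keys_foldl_modify_key wl PySem.Str.len [] (fun _ i => fun l => l ++ [i]) _
  have hmemkeys : ∀ x : Int, x ∈ (pvGroups wl).keys ↔ x ∈ wl.map PySem.Str.len := by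
    intro x
    rw [hkeys]
    simp [PySem.Dict.keys_empty, PySem.Set.update_eq_append_filter, PySem.Set.mem_ofList]
  show (match PySem.List.max? (pvGroups wl).keys (fun y => y) with
        | none => none
        | some key => pvOuter (pvGroups wl) key.toNat)
      = (match PySem.List.max? (pvGroups wl).keys (fun y => y) with
        | none => (none : Option String)
        | some key => pvScanB (pvGroups wl) key.toNat PySem.Dict.empty)
  cases hmax : PySem.List.max? (pvGroups wl).keys (fun y => y) with
  | none =>
    exfalso
    rw [PySem.List.max?_eq_none_iff] at hmax
    obtain ⟨w, hw⟩ := List.exists_mem_of_ne_nil wl hpre'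
    have : PySem.Str.len w ∈ (pvGroups wl).keys :=
      (hmemkeys _).mpr (List.mem_map_of_mem hw)
    rw [hmax] at this
    exact List.not_mem_nil this
  | some key =>
    have hkmem := PySem.List.max?_mem hmax
    obtain ⟨w0, _, hw0len⟩ := List.mem_map.mp ((hmemkeys key).mp hkmem)
    have hkey0 : 0 ≤ key := by
      rw [← hw0len, PySem.Str.len_eq]
      exact Int.natCast_nonneg _
    obtain ⟨M, rfl⟩ : ∃ M : Nat, key = (M : Int) :=
      ⟨key.toNat, (Int.toNat_of_nonneg hkey0).symm⟩
    have htn : ((M : Int)).toNat = M := Int.toNat_natCast M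
    simp only [htn]
    have hGoodEmpty : GoodMemo (pvGroups wl) PySem.Dict.empty := by
      intro w b hw
      simp [PySem.Dict.get?_empty] at hw
    exact (pvScanB_eq (pvGroups wl) hg M PySem.Dict.empty hGoodEmpty).symm
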